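-- pv_equiv track=rewrite | github.com/michalvanco0/bakalarka | analysis.py | get_punctuation_distances
-- ===== SOURCE A (Python) =====
-- def get_punctuation_distances(tokens, punctuation_set):
--     distances = []
--     last_index = None
--     for i, token in enumerate(tokens):
--         if token in punctuation_set:
--             if last_index is not None:
--                 dist = i - last_index - 1
--                 if dist > 0:
--                     distances.append(dist)
--             last_index = i
--     return distances
-- ===== SOURCE B (Python) =====
-- def get_punctuation_distances(tokens, punctuation_set):
--     # Split the token stream at punctuation marks into segments of the
--     # tokens lying between them; a distance is the length of a nonempty
--     # interior segment (the segment before the first mark is dropped, and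
--     # the tail after the last mark is never flushed into a segment).
--     segments = []
--     cur = []
--     for t in tokens:
--         if t in punctuation_set:
--             segments.append(cur)
--             cur = []
--         else:
--             cur.append(t)
--     return [len(s) for s in segments[1:] if s]
-- ===== Notes on version B (the rewrite author's own statement) =====
-- stated objective: alternative
-- what changed: Replaces A's index arithmetic (tracking last_index and computing i - last - 1) with a split-then-measure decomposition: the token stream is split at punctuation marks into segments, and the distances are the lengths of the nonempty interior segments; no token indices are ever computed.
import Mathlib
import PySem

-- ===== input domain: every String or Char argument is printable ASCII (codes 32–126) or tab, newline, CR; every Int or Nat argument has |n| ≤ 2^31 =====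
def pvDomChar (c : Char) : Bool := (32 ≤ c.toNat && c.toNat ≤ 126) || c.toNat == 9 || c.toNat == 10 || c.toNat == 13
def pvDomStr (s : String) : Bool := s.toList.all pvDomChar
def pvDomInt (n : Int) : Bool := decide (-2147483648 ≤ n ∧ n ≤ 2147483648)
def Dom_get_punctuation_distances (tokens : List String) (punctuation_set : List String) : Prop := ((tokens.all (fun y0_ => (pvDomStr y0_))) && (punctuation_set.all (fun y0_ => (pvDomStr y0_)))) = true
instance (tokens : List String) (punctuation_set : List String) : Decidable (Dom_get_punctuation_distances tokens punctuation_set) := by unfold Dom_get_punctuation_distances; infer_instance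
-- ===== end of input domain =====

-- B replaces A's index arithmetic (last_index, i - last - 1) by splitting the token
-- stream at punctuation marks and taking the lengths of the nonempty interior segments
-- (objective: alternative decomposition, no indices computed).

-- ===== PORT A =====
-- Literal port of A: one fold over enumerate(tokens), state = (distances, last_index : Option Int).
def get_punctuation_distances (tokens : List String) (punctuation_set : List String) : List Int :=
  ((PySem.List.enumerate tokens).foldl
    (fun (st : List Int × Option Int) p =>
      if p.2 ∈ punctuation_set then
        match st.2 with
        | some last =>
            let dist := p.1 - last - 1
            ((if dist > 0 then st.1 ++ [dist] else st.1), some p.1)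
        | none => (st.1, some p.1)
      else st)
    ([], none)).1

-- ===== PORT B =====
-- Literal port of Source B: split tokens at punctuation into (segments, cur), then
-- lengths of the nonempty segments after the first (segments[1:]).
def get_punctuation_distances_alt (tokens : List String) (punctuation_set : List String) : List Int :=
  let st := tokens.foldl
    (fun (st : List (List String) × List String) t =>
      if t ∈ punctuation_set then (st.1 ++ [st.2], [])
      else (st.1, st.2 ++ [t]))
    ([], [])
  ((st.1.drop 1).filter (fun s => !s.isEmpty)).map (fun s => (s.length : Int))

-- ===== PRECONDITION & SPEC =====
def Spec_get_punctuation_distances (tokens : List String) (punctuation_set : List String) (out : List Int) : Prop := out = get_punctuation_distances_alt tokens punctuation_set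
instance (tokens : List String) (punctuation_set : List String) (out : List Int) : Decidable (Spec_get_punctuation_distances tokens punctuation_set out) := by unfold Spec_get_punctuation_distances; infer_instance

-- ===== CLAIM =====
def Claim_equal_get_punctuation_distances : Prop := ∀ (tokens : List String) (punctuation_set : List String), Dom_get_punctuation_distances tokens punctuation_set → Spec_get_punctuation_distances tokens punctuation_set (get_punctuation_distances tokens punctuation_set)

-- ===== LEMMAS AND PROOFS =====

-- Reference function: state = none (no mark seen) or some r (a mark seen, r tokens since it).
def pvCore (P : List String) : List String → Option Int → List Int
  | [], _ => []
  | t :: ts, st =>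
      if t ∈ P then
        (match st with
         | some r => if r > 0 then [r] else []
         | none => []) ++ pvCore P ts (some 0)
      else pvCore P ts (st.map (· + 1))

-- segments produced by B's fold (the pending cur is never flushed)
def pvSegs (P : List String) : List String → List String → List (List String)
  | [], _ => []
  | t :: ts, cur => if t ∈ P then cur :: pvSegs P ts [] else pvSegs P ts (cur ++ [t])

lemma pvA_fold (P : List String) :
    ∀ (ts : List String) (n : Int) (acc : List Int) (last : Option Int),
    ((PySem.List.enumerate ts n).foldl
      (fun (st : List Int × Option Int) p =>
        if p.2 ∈ P then
          match st.2 with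
          | some lastv =>
              let dist := p.1 - lastv - 1
              ((if dist > 0 then st.1 ++ [dist] else st.1), some p.1)
          | none => (st.1, some p.1)
        else st)
      (acc, last)).1
    = acc ++ pvCore P ts (last.map (fun a => n - a - 1)) := by
  intro ts
  induction ts with
  | nil => intro n acc last; simp [PySem.List.enumerate_nil, pvCore]
  | cons t ts ih =>
      intro n acc last
      rw [PySem.List.enumerate_cons, List.foldl_cons]
      by_cases hp : t ∈ P
      · cases last with
        | none =>
            simp only [hp, if_pos, pvCore, Option.map_none]
            rw [ih]
            simp
        | some a =>
            simp only [hp, if_pos, Option.map_some, pvCore]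
            rw [ih]
            simp only [Option.map_some]
            have h1 : n + 1 - n - 1 = (0 : Int) := by ring
            rw [h1]
            split_ifs with h <;> simp
      · cases last with
        | none =>
            simp only [hp, if_neg, not_false_iff, pvCore]
            rw [ih]; rfl
        | some a =>
            simp only [hp, ite_false, pvCore]
            rw [ih]
            simp only [Option.map_some]
            have h1 : n + 1 - a - 1 = n - a - 1 + 1 := by ring
            rw [h1]

lemma pvB_fold (P : List String) :
    ∀ (ts : List String) (segs : List (List String)) (cur : List String),
    (ts.foldl
      (fun (st : List (List String) × List String) t =>
        if t ∈ P then (st.1 ++ [st.2], [])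
        else (st.1, st.2 ++ [t]))
      (segs, cur)).1
    = segs ++ pvSegs P ts cur := by
  intro ts
  induction ts with
  | nil => intro segs cur; simp [pvSegs]
  | cons t ts ih =>
      intro segs cur
      rw [List.foldl_cons]
      by_cases hp : t ∈ P
      · simp only [hp, if_pos, pvSegs]
        rw [ih]; simp
      · simp only [hp, ite_false, pvSegs]
        rw [ih]

-- seen-state: the filtered length list of the segments equals pvCore with run cur.length
lemma pvSegs_core_some (P : List String) :
    ∀ (ts : List String) (cur : List String),
    ((pvSegs P ts cur).filter (fun s => !s.isEmpty)).map (fun s => (s.length : Int))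
    = pvCore P ts (some (cur.length : Int)) := by
  intro ts
  induction ts with
  | nil => intro cur; simp [pvSegs, pvCore]
  | cons t ts ih =>
      intro cur
      by_cases hp : t ∈ P
      · simp only [pvSegs, pvCore, hp, if_pos, List.filter_cons]
        cases cur with
        | nil => simpa using ih []
        | cons c cs =>
            have hgt : (((c :: cs).length : Nat) : Int) > 0 := by
              exact_mod_cast Nat.succ_pos cs.length
            rw [show pvCore P ts (some 0) = pvCore P ts (some (([] : List String).length : Int)) by simp,
                ← ih [], if_pos hgt]
            simp
      · simp only [pvSegs, pvCore, hp, ite_false, Option.map_some]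
        rw [ih]
        congr 1
        simp [List.length_append]

-- unseen-state: the first segment is dropped, for any pending cur
lemma pvSegs_core_none (P : List String) :
    ∀ (ts : List String) (cur : List String),
    (((pvSegs P ts cur).drop 1).filter (fun s => !s.isEmpty)).map (fun s => (s.length : Int))
    = pvCore P ts none := by
  intro ts
  induction ts with
  | nil => intro cur; simp [pvSegs, pvCore]
  | cons t ts ih =>
      intro cur
      by_cases hp : t ∈ P
      · simp only [pvSegs, pvCore, hp, if_pos, List.drop_succ_cons, List.drop_zero, List.nil_append]
        simpa using pvSegs_core_some P ts []
      · simp only [pvSegs, pvCore, hp, ite_false]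
        exact ih (cur ++ [t])

-- ===== VERDICT =====
theorem get_punctuation_distances_spec : Claim_equal_get_punctuation_distances := by
  intro tokens punctuation_set _
  unfold Spec_get_punctuation_distances get_punctuation_distances
  simp only [get_punctuation_distances_alt]
  rw [show (PySem.List.enumerate tokens) = PySem.List.enumerate tokens 0 from rfl,
      pvA_fold, pvB_fold]
  simp only [Option.map_none, List.nil_append]
  exact (pvSegs_core_none punctuation_set tokens []).symm
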